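-- pv_equiv track=rewrite | github.com/seonyong-kim/Codetree | 260227/함수를 이용한 온전수 판별/determining-the-whole-number-using-a-function.py | checkOn
-- ===== SOURCE A (Python) =====
-- def checkOn(a,b):
--     count = 0
--     for i in range(a,b+1):
--         if(i % 2 != 0 and i%10 != 5):
--             if (i%3 == 0 and i%9 != 0):
--                 continue
--             count += 1
--     return count
-- ===== SOURCE B (Python) =====
-- def _ok(k):
--     return k % 2 != 0 and k % 10 != 5 and not (k % 3 == 0 and k % 9 != 0)
--
-- def _below(n):
--     # number of qualifying integers in [0, n): whole periods of 90 plus a remainder scan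
--     q, r = divmod(n, 90)
--     return q * 28 + sum(1 for k in range(r) if _ok(k))
--
-- def checkOn(a, b):
--     if a > b:
--         return 0
--     return _below(b + 1) - _below(a)
-- ===== Notes on version B (the rewrite author's own statement) =====
-- stated objective: faster
-- what changed: Replaces the O(b-a) scan with a closed form: the predicate is periodic with period 90 (28 qualifiers per period), so B counts whole periods arithmetically and scans at most 89 leftover residues; intended as faster, a timing run measured ~87x median at n=262144 on non-degenerate ranges (on empty/descending ranges both are instant).
import Mathlib
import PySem

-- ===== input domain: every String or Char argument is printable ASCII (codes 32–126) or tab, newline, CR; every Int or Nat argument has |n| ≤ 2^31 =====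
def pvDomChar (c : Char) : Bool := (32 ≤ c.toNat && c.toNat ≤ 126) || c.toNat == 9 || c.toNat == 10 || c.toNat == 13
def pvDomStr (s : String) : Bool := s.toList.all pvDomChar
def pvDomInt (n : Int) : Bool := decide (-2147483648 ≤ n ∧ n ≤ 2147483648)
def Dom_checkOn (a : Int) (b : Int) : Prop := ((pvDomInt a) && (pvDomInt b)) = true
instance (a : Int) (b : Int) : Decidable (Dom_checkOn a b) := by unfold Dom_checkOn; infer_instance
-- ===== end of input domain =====

-- B replaces A's element-by-element scan of [a, b] by counting whole periods of the
-- predicate (period 90, 28 qualifiers each) arithmetically, scanning only remainders.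

-- ===== PORT A =====
def checkOn (a : Int) (b : Int) : Int :=
  (PySem.List.pyRange a (b + 1) 1).foldl
    (fun count i =>
      if PySem.Int.mod i 2 ≠ 0 ∧ PySem.Int.mod i 10 ≠ 5 then
        if PySem.Int.mod i 3 = 0 ∧ PySem.Int.mod i 9 ≠ 0 then count
        else count + 1
      else count)
    0

-- ===== PORT B =====
def pvOk (k : Int) : Bool :=
  PySem.Int.mod k 2 != 0 && PySem.Int.mod k 10 != 5 &&
    !(PySem.Int.mod k 3 == 0 && PySem.Int.mod k 9 != 0)

-- number of qualifying integers in [0, n): whole periods of 90 plus a remainder scan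
def pvBelow (n : Int) : Int :=
  let q := PySem.Int.floordiv n 90
  let r := PySem.Int.mod n 90
  q * 28 + (PySem.List.pyRange 0 r 1).foldl (fun s k => if pvOk k then s + 1 else s) 0

def checkOn_alt (a : Int) (b : Int) : Int :=
  if a > b then 0 else pvBelow (b + 1) - pvBelow a

-- ===== PRECONDITION & SPEC =====
def Spec_checkOn (a : Int) (b : Int) (out : Int) : Prop := out = checkOn_alt a b
instance (a : Int) (b : Int) (out : Int) : Decidable (Spec_checkOn a b out) := by unfold Spec_checkOn; infer_instance

-- ===== CLAIM (what is proved, stated in full; the proofs are below) =====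
def Claim_equal_checkOn : Prop := ∀ (a : Int) (b : Int), Dom_checkOn a b → Spec_checkOn a b (checkOn a b)

-- ===== LEMMAS AND PROOFS =====

-- the predicate only depends on n mod 90 (all its divisors divide 90)
theorem pvOk_mod_90 (n : Int) : pvOk (PySem.Int.mod n 90) = pvOk n := by
  simp only [pvOk, PySem.Int.mod_eq_emod_of_pos (by norm_num : (0:Int) < 2),
    PySem.Int.mod_eq_emod_of_pos (by norm_num : (0:Int) < 10),
    PySem.Int.mod_eq_emod_of_pos (by norm_num : (0:Int) < 3),
    PySem.Int.mod_eq_emod_of_pos (by norm_num : (0:Int) < 9),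
    PySem.Int.mod_eq_emod_of_pos (by norm_num : (0:Int) < 90)]
  rw [Int.emod_emod_of_dvd n (by norm_num : (2:Int) ∣ 90),
      Int.emod_emod_of_dvd n (by norm_num : (10:Int) ∣ 90),
      Int.emod_emod_of_dvd n (by norm_num : (3:Int) ∣ 90),
      Int.emod_emod_of_dvd n (by norm_num : (9:Int) ∣ 90)]

-- A's loop body is the 0/1 increment of pvOk
theorem bodyA_eq (c i : Int) :
    (if PySem.Int.mod i 2 ≠ 0 ∧ PySem.Int.mod i 10 ≠ 5 then
        if PySem.Int.mod i 3 = 0 ∧ PySem.Int.mod i 9 ≠ 0 then c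
        else c + 1
      else c) = if pvOk i then c + 1 else c := by
  simp only [pvOk, Bool.and_eq_true, bne_iff_ne, Bool.not_eq_true', Bool.and_eq_false_iff,
    bne_eq_false_iff_eq]
  split_ifs <;> simp_all

-- proof-layer name for B's remainder scan (keeps rewrite targets stable)
def pvScan (r : Int) : Int :=
  (PySem.List.pyRange 0 r 1).foldl (fun s k => if pvOk k then s + 1 else s) 0

theorem pvBelow_eq (n : Int) : pvBelow n = n / 90 * 28 + pvScan (n % 90) := by
  simp only [pvBelow, pvScan, PySem.Int.mod_eq_emod_of_pos (by norm_num : (0:Int) < 90),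
    PySem.Int.floordiv_eq_ediv_of_pos (by norm_num : (0:Int) < 90)]

-- the remainder scan, extended by one step
theorem pvScan_succ (r : Int) (hr : 0 ≤ r) :
    pvScan (r + 1) = pvScan r + (if pvOk r then 1 else 0) := by
  unfold pvScan
  rw [PySem.List.pyRange_one_succ_right hr, List.foldl_append]
  simp only [List.foldl_cons, List.foldl_nil]
  split_ifs <;> ring

theorem pvScan_89 : pvScan 89 = 27 := by decide

theorem pvScan_zero : pvScan 0 = 0 := by decide

theorem pvOk_89 : pvOk 89 = true := by decide

theorem pvBelow_succ (n : Int) :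
    pvBelow (n + 1) = pvBelow n + (if pvOk n then 1 else 0) := by
  have hok : pvOk (n % 90) = pvOk n := by
    rw [← pvOk_mod_90 n, PySem.Int.mod_eq_emod_of_pos (by norm_num : (0:Int) < 90)]
  rw [pvBelow_eq, pvBelow_eq]
  have hr0 : 0 ≤ n % 90 := Int.emod_nonneg n (by norm_num)
  have hr1 : n % 90 < 90 := Int.emod_lt_of_pos n (by norm_num)
  by_cases h89 : n % 90 = 89
  · have hd : (n + 1) / 90 = n / 90 + 1 := by omega
    have hm : (n + 1) % 90 = 0 := by omega
    rw [hd, hm, pvScan_zero, ← hok, h89, pvScan_89, pvOk_89]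
    norm_num
    ring
  · have hd : (n + 1) / 90 = n / 90 := by omega
    have hm : (n + 1) % 90 = n % 90 + 1 := by omega
    rw [hd, hm, pvScan_succ (n % 90) hr0, hok]
    ring

-- A's fold over [a, a+k) with any initial accumulator, in terms of pvBelow
theorem loop_aux (k : Nat) :
    ∀ (a c : Int),
      (PySem.List.pyRange a (a + k) 1).foldl
        (fun count i =>
          if PySem.Int.mod i 2 ≠ 0 ∧ PySem.Int.mod i 10 ≠ 5 then
            if PySem.Int.mod i 3 = 0 ∧ PySem.Int.mod i 9 ≠ 0 then count
            else count + 1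
          else count) c = c + pvBelow (a + k) - pvBelow a := by
  induction k with
  | zero =>
    intro a c
    rw [PySem.List.pyRange_one_eq_nil (by omega : a + ((0:Nat):Int) ≤ a)]
    simp
  | succ m ih =>
    intro a c
    rw [PySem.List.pyRange_one_cons (by push_cast; omega : a < a + ((m + 1 : Nat) : Int))]
    rw [List.foldl_cons, bodyA_eq]
    have harg : a + ((m + 1 : Nat) : Int) = (a + 1) + (m : Int) := by push_cast; ring
    rw [harg, ih (a + 1) _]
    rw [pvBelow_succ a]
    split_ifs <;> ring

theorem checkOn_loop (a b : Int) (h : a ≤ b + 1) :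
    checkOn a b = pvBelow (b + 1) - pvBelow a := by
  have hk : b + 1 = a + ((b + 1 - a).toNat : Int) := by omega
  unfold checkOn
  rw [hk, loop_aux (b + 1 - a).toNat a 0]
  ring

-- ===== VERDICT (by name: the statement is the Claim_ definition above) =====
theorem checkOn_spec : Claim_equal_checkOn := by
  intro a b _
  unfold Spec_checkOn checkOn_alt
  by_cases h : a > b
  · simp only [if_pos h]
    unfold checkOn
    rw [PySem.List.pyRange_one_eq_nil (by omega)]
    rfl
  · rw [if_neg h]
    exact checkOn_loop a b (by omega)
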